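-- pv_equiv track=rewrite | github.com/alexeiakimenko/pythonalex | HomeWork Python/hw22.02/change.py | change_to_str
-- ===== SOURCE A (Python) =====
-- def change_to_str(s, c_old, c_new):
--     s2 = ""
--     i = 0
--     while i < len(s):
--         if s[i] == c_old and i % 2 == 0:
--
--             s2 += c_new
--         else:
--             s2 += s[i]
--         i += 1
--     return s2
-- ===== SOURCE B (Python) =====
-- def change_to_str(s, c_old, c_new):
--     result = list(s)
--     for i in range(0, len(s), 2):
--         if result[i] == c_old:
--             result[i] = c_new
--     return "".join(result)
-- ===== Notes on version B (the rewrite author's own statement) =====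
-- stated objective: faster
-- what changed: B edits a mutable list buffer in place, looping only over the stride-2 even indices (so the parity test and the odd-index branch disappear) and joining once, instead of A's while loop over every index with a parity check and repeated string concatenation.
import Mathlib
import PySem

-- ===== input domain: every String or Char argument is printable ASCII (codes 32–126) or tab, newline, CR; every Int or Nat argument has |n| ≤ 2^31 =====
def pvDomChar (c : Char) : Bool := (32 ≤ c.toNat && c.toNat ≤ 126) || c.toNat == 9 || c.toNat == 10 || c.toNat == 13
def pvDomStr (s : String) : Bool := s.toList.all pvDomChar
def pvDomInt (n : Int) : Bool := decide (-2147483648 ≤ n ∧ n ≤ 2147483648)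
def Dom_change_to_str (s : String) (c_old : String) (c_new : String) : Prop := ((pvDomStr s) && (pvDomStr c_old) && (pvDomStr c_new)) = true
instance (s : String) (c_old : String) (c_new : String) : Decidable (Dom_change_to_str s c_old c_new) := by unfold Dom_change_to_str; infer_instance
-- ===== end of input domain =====

-- B replaces A's per-index while loop (parity test + string concatenation) by an in-place
-- list buffer updated only at the stride-2 even indices and joined once (simpler decomposition).

-- ===== PORT A =====
-- while i < len(s): append c_new if s[i] == c_old and i % 2 == 0 else s[i]
def changeAGo (c_old : String) (c_new : String) : List Char → Nat → String → String
  | [], _, s2 => s2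
  | c :: rest, i, s2 =>
      changeAGo c_old c_new rest (i + 1)
        (s2 ++ (if String.ofList [c] == c_old && i % 2 == 0 then c_new else String.ofList [c]))

def change_to_str (s : String) (c_old : String) (c_new : String) : String :=
  changeAGo c_old c_new s.toList 0 ""

-- ===== PORT B =====
-- one iteration of B's for-loop body: if result[i] == c_old: result[i] = c_new
def stepB (c_old : String) (c_new : String) (result : List String) (i : Int) : List String :=
  if PySem.List.pyGetD result i "" == c_old then result.set i.toNat c_new else result

def change_to_str_alt (s : String) (c_old : String) (c_new : String) : String :=
  let result := s.toList.map (fun c => String.ofList [c])          -- list(s)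
  let result := (PySem.List.pyRange 0 (s.toList.length : Int) 2).foldl (stepB c_old c_new) result
  String.join result                                           -- "".join(result)

-- ===== PRECONDITION & SPEC =====
def Spec_change_to_str (s : String) (c_old : String) (c_new : String) (out : String) : Prop := out = change_to_str_alt s c_old c_new
instance (s : String) (c_old : String) (c_new : String) (out : String) : Decidable (Spec_change_to_str s c_old c_new out) := by unfold Spec_change_to_str; infer_instance

-- ===== CLAIM (what is proved, stated in full; the proofs are below) =====
def Claim_equal_change_to_str : Prop := ∀ (s : String) (c_old : String) (c_new : String), Dom_change_to_str s c_old c_new → Spec_change_to_str s c_old c_new (change_to_str s c_old c_new)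

-- ===== LEMMAS AND PROOFS =====

-- the per-character result of A, as a function of the index
def fA (c_old : String) (c_new : String) (i : Nat) (c : Char) : String :=
  if String.ofList [c] == c_old && i % 2 == 0 then c_new else String.ofList [c]

-- A's output characterised: the list of per-character pieces starting at index i
def gA (c_old : String) (c_new : String) : Nat → List Char → List String
  | _, [] => []
  | i, c :: rest => fA c_old c_new i c :: gA c_old c_new (i + 1) rest

-- the common two-at-a-time characterisation (even index rewritten, odd kept)
def g2 (c_old : String) (c_new : String) : List Char → List String
  | [] => []
  | [c] => [if String.ofList [c] == c_old then c_new else String.ofList [c]]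
  | c1 :: c2 :: rest =>
      (if String.ofList [c1] == c_old then c_new else String.ofList [c1]) :: String.ofList [c2] ::
        g2 c_old c_new rest

theorem strFoldl (l : List String) :
    ∀ acc : String, l.foldl (fun r s => r ++ s) acc = acc ++ String.join l := by
  induction l with
  | nil => intro acc; simp [String.join]
  | cons x xs ih =>
      intro acc
      have hjoin : String.join (x :: xs) = x ++ String.join xs := by
        show List.foldl (fun r s => r ++ s) "" (x :: xs) = _
        rw [List.foldl_cons, ih]
        simp
      rw [List.foldl_cons, ih, hjoin, String.append_assoc]

theorem changeAGo_eq (c_old c_new : String) :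
    ∀ (cs : List Char) (i : Nat) (acc : String),
      changeAGo c_old c_new cs i acc = acc ++ String.join (gA c_old c_new i cs) := by
  intro cs
  induction cs with
  | nil => intro i acc; simp [changeAGo, gA, String.join]
  | cons c rest ih =>
      intro i acc
      have hjoin : String.join (fA c_old c_new i c :: gA c_old c_new (i+1) rest)
          = fA c_old c_new i c ++ String.join (gA c_old c_new (i+1) rest) := by
        show List.foldl (fun r s => r ++ s) "" _ = _
        rw [List.foldl_cons, strFoldl]
        simp
      simp only [fA] at hjoin
      simp only [changeAGo, gA, ih, fA, hjoin, String.append_assoc]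

theorem gA_shift (c_old c_new : String) :
    ∀ (cs : List Char) (i : Nat), gA c_old c_new (i + 2) cs = gA c_old c_new i cs := by
  intro cs
  induction cs with
  | nil => intro i; rfl
  | cons c rest ih =>
      intro i
      have hp : (i + 2) % 2 = i % 2 := by omega
      simp [gA, fA, hp]
      have := ih (i + 1)
      simpa [Nat.add_assoc, Nat.add_comm, Nat.add_left_comm] using this

theorem gA_eq_g2 (c_old c_new : String) :
    ∀ (cs : List Char), gA c_old c_new 0 cs = g2 c_old c_new cs := by
  intro cs
  induction cs using g2.induct with
  | case1 => rfl
  | case2 c => simp [gA, g2, fA]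
  | case3 c1 c2 rest ih =>
      have h2 : gA c_old c_new 2 rest = gA c_old c_new 0 rest := gA_shift c_old c_new rest 0
      simp [gA, g2, fA, h2, ih]

-- pyRange 0 n 2 over a Nat bound, as a mapped List.range
theorem pyRange_two_nat (n : Nat) :
    PySem.List.pyRange 0 (n : Int) 2 = (List.range ((n + 1) / 2)).map (fun k : Nat => 2 * (k : Int)) := by
  rw [PySem.List.pyRange_of_pos 0 (n : Int) (by norm_num)]
  by_cases h : (0 : Int) < (n : Int)
  · rw [if_pos h]
    have ht : (((n : Int) - 0 + 2 - 1) / 2).toNat = (n + 1) / 2 := by omega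
    rw [ht]
    simp only [zero_add]
  · rw [if_neg h]
    have hn : n = 0 := by omega
    subst hn; simp

theorem pyRange_two_cons (n : Nat) :
    PySem.List.pyRange 0 ((n + 2 : Nat) : Int) 2 =
      0 :: (PySem.List.pyRange 0 (n : Int) 2).map (fun x => x + 2) := by
  rw [pyRange_two_nat, pyRange_two_nat]
  have h : (n + 2 + 1) / 2 = (n + 1) / 2 + 1 := by omega
  rw [h, List.range_succ_eq_map, List.map_cons]
  have htail : ((List.range ((n + 1) / 2)).map Nat.succ).map (fun k : Nat => 2 * (k : Int)) =
      ((List.range ((n + 1) / 2)).map (fun k : Nat => 2 * (k : Int))).map (fun x => x + 2) := by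
    simp only [List.map_map]
    refine List.map_congr_left ?_
    intro x _
    simp only [Function.comp]
    push_cast
    ring
  rw [htail]
  norm_num

theorem foldl_stepB_shift (c_old c_new : String) :
    ∀ (l : List Int), (∀ x ∈ l, 0 ≤ x) → ∀ (b0 b1 : String) (rest : List String),
      (l.map (fun x => x + 2)).foldl (stepB c_old c_new) (b0 :: b1 :: rest) =
        b0 :: b1 :: l.foldl (stepB c_old c_new) rest := by
  intro l
  induction l with
  | nil => intro _ b0 b1 rest; rfl
  | cons x xs ih =>
      intro hnn b0 b1 rest
      have hx : 0 ≤ x := hnn x (by simp)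
      have hget : PySem.List.pyGetD (b0 :: b1 :: rest) (x + 2) "" =
          PySem.List.pyGetD rest x "" := by
        rw [PySem.List.pyGetD_of_nonneg _ _ (by omega : (0:Int) ≤ x + 2), PySem.List.pyGetD_of_nonneg _ _ hx]
        have ht : (x + 2).toNat = x.toNat + 2 := by omega
        rw [ht]
        rfl
      have hset : ((b0 :: b1 :: rest).set (x + 2).toNat c_new) =
          b0 :: b1 :: rest.set x.toNat c_new := by
        have ht : (x + 2).toNat = x.toNat + 2 := by omega
        rw [ht]; rfl
      have hstep : stepB c_old c_new (b0 :: b1 :: rest) (x + 2) =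
          b0 :: b1 :: stepB c_old c_new rest x := by
        unfold stepB
        rw [hget, hset]
        split_ifs <;> rfl
      simp only [List.map_cons, List.foldl_cons, hstep]
      exact ih (fun y hy => hnn y (by simp [hy])) b0 b1 _

theorem pyRange_two_nonneg (n : Nat) :
    ∀ x ∈ PySem.List.pyRange 0 (n : Int) 2, 0 ≤ x := by
  rw [pyRange_two_nat]
  intro x hx
  simp at hx
  obtain ⟨k, _, rfl⟩ := hx
  positivity

theorem foldl_stepB_eq_g2 (c_old c_new : String) :
    ∀ (cs : List Char),
      (PySem.List.pyRange 0 (cs.length : Int) 2).foldl (stepB c_old c_new)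
          (cs.map (fun c => String.ofList [c])) = g2 c_old c_new cs := by
  intro cs
  induction cs using g2.induct with
  | case1 => rfl
  | case2 c =>
      show (PySem.List.pyRange 0 ((1 : Nat) : Int) 2).foldl _ _ = _
      rw [pyRange_two_nat]
      norm_num [List.range_one]
      unfold stepB g2
      simp [PySem.List.pyGetD]
      split_ifs <;> rfl
  | case3 c1 c2 rest ih =>
      show (PySem.List.pyRange 0 ((rest.length + 2 : Nat) : Int) 2).foldl _ _ = _
      rw [pyRange_two_cons]
      simp only [List.map_cons, List.foldl_cons]
      have hstep0 : stepB c_old c_new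
          (String.ofList [c1] :: String.ofList [c2] :: rest.map (fun c => String.ofList [c])) 0 =
          (if String.ofList [c1] == c_old then c_new else String.ofList [c1]) :: String.ofList [c2] ::
            rest.map (fun c => String.ofList [c]) := by
        unfold stepB
        simp [PySem.List.pyGetD]
        split_ifs <;> rfl
      rw [hstep0,
        foldl_stepB_shift c_old c_new _ (pyRange_two_nonneg rest.length) _ _ _, ih]
      rfl

-- ===== VERDICT (by name: the statement is the Claim_ definition above) =====
theorem change_to_str_spec : Claim_equal_change_to_str := by
  intro s c_old c_new _
  unfold Spec_change_to_str change_to_str change_to_str_alt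
  rw [changeAGo_eq, gA_eq_g2]
  show "" ++ String.join (g2 c_old c_new s.toList) =
    String.join ((PySem.List.pyRange 0 (s.toList.length : Int) 2).foldl (stepB c_old c_new)
      (s.toList.map (fun c => String.ofList [c])))
  rw [foldl_stepB_eq_g2]
  simp
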